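-- pv_equiv track=rewrite | github.com/guanchaobaba/MGBR | dataset.py | filter_ui
-- ===== SOURCE A (Python) =====
-- def filter_ui(U_B_pairs, U_I_pairs, num):
--     u_b = list(set(list(map(lambda s: s[0], U_B_pairs))))
--     u_i = list(filter(lambda i: i[0] in u_b, U_I_pairs))
--     l1 = [[]] * num
--     for i in u_b:
--         p1 = list(filter(lambda s: s[0] == i, u_i))
--         l1[i] = list(map(lambda s: s[1], p1))
--     return l1
-- ===== SOURCE B (Python) =====
-- def filter_ui(U_B_pairs, U_I_pairs, num):
--     # One pass over U_I_pairs grouping second items by first item, then one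
--     # pass over U_B_pairs placing each user's group into its slot.
--     groups = {}
--     for u, v in U_I_pairs:
--         groups.setdefault(u, []).append(v)
--     out = [[] for _ in range(num)]
--     for u, _ in U_B_pairs:
--         out[u] = groups.get(u, [])
--     return out
-- ===== Notes on version B (the rewrite author's own statement) =====
-- stated objective: alternative
-- what changed: Replaced the per-user rescan of the filtered interaction list (one filter pass over U_I_pairs for every distinct user) by a single-pass dict grouping of U_I_pairs plus one pass over U_B_pairs placing each group into its slot; asymptotically better but not confirmed faster in a timing run.
-- outside the precondition, e.g. on filter_ui([(-2, 0), (0, 0)], [(0, 5), (-2, 7)], 2): A returns [[7], []], B returns [[5], []]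
import Mathlib
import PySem

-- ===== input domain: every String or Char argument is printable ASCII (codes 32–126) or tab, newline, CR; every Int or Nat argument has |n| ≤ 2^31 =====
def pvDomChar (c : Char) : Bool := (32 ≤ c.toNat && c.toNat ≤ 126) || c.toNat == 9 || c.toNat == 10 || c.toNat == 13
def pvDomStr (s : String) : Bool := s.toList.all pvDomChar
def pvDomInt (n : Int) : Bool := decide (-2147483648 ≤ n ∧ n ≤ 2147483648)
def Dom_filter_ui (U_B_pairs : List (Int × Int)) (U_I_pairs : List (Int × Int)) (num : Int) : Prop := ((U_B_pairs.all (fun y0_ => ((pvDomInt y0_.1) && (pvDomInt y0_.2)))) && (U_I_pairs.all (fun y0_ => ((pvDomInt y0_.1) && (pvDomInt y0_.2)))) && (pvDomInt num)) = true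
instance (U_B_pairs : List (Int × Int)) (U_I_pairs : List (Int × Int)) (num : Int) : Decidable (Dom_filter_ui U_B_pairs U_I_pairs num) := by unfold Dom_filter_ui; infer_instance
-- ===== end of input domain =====

-- B replaces A's per-user rescan of the interaction list by one dict-grouping pass
-- over U_I_pairs plus one placement pass over U_B_pairs (objective: alternative;
-- removes the per-user rescan, not confirmed faster in a timing run).

-- ===== PORT A =====
-- Python set iteration order is not modelled (PySem.Set is first-occurrence order);
-- this is exact under Pre_, where distinct users write distinct slots, so the fold's
-- result does not depend on the iteration order.  pySetD is the total form of the
-- list assignment l1[i] = …, exact under Pre_ (index in range).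
def filter_ui (U_B_pairs : List (Int × Int)) (U_I_pairs : List (Int × Int)) (num : Int) : List (List Int) :=
  let u_b : PySem.Set Int := PySem.Set.ofList (U_B_pairs.map (fun s => s.1))
  let u_i := U_I_pairs.filter (fun i => PySem.Set.contains u_b i.1)
  let l1 : List (List Int) := List.replicate num.toNat []
  u_b.foldl (fun l1 i =>
    let p1 := u_i.filter (fun s => s.1 == i)
    PySem.List.pySetD l1 i (p1.map (fun s => s.2))) l1

-- ===== PORT B =====
-- groups.setdefault(u, []).append(v)  ==  groups[u] = groups.get(u, []) + [v]  ==  Dict.modify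
def filter_ui_alt (U_B_pairs : List (Int × Int)) (U_I_pairs : List (Int × Int)) (num : Int) : List (List Int) :=
  let groups : PySem.Dict Int (List Int) :=
    U_I_pairs.foldl (fun d p => d.modify p.1 [] (fun l => l ++ [p.2])) PySem.Dict.empty
  let out : List (List Int) := List.replicate num.toNat []
  U_B_pairs.foldl (fun out p => PySem.List.pySetD out p.1 (PySem.Dict.getD groups p.1 [])) out

-- ===== PRECONDITION & SPEC =====
-- Pre_ excludes (a) user ids outside [-num, num), on which A raises IndexError, and
-- (b) pairs of user ids i < 0 ≤ j with i + num = j, which collide on one output slot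
-- through Python's negative indexing, where A's value depends on set iteration order
-- (a hash-order accident) while B's depends on U_B_pairs order — both defensible.
def Pre_filter_ui (U_B_pairs : List (Int × Int)) (U_I_pairs : List (Int × Int)) (num : Int) : Prop :=
  (∀ p ∈ U_B_pairs, -num ≤ p.1 ∧ p.1 < num) ∧
  (∀ p ∈ U_B_pairs, ∀ q ∈ U_B_pairs, p.1 < 0 → 0 ≤ q.1 → p.1 + num ≠ q.1)
instance (U_B_pairs : List (Int × Int)) (U_I_pairs : List (Int × Int)) (num : Int) : Decidable (Pre_filter_ui U_B_pairs U_I_pairs num) := by unfold Pre_filter_ui; infer_instance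

def pvWitness_filter_ui : (List (Int × Int)) × (List (Int × Int)) × Int :=
  ([(0, 1), (2, 4)], [(0, 5), (2, 6), (1, 7), (0, 8)], 3)

def Spec_filter_ui (U_B_pairs : List (Int × Int)) (U_I_pairs : List (Int × Int)) (num : Int) (out : List (List Int)) : Prop := out = filter_ui_alt U_B_pairs U_I_pairs num
instance (U_B_pairs : List (Int × Int)) (U_I_pairs : List (Int × Int)) (num : Int) (out : List (List Int)) : Decidable (Spec_filter_ui U_B_pairs U_I_pairs num out) := by unfold Spec_filter_ui; infer_instance

-- ===== CLAIM (what is proved, stated in full; the proofs are below) =====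
def Claim_equal_filter_ui : Prop := ∀ (U_B_pairs : List (Int × Int)) (U_I_pairs : List (Int × Int)) (num : Int), Dom_filter_ui U_B_pairs U_I_pairs num → Pre_filter_ui U_B_pairs U_I_pairs num → Spec_filter_ui U_B_pairs U_I_pairs num (filter_ui U_B_pairs U_I_pairs num)

-- ===== LEMMAS AND PROOFS =====

-- the slot a user id u writes to (Python negative indexing into a length-num list)
def pvSlot (num u : Int) : Nat := (if u < 0 then u + num else u).toNat

-- the group of second items of a user
def pvVals (U_I_pairs : List (Int × Int)) (u : Int) : List Int :=
  (U_I_pairs.filter (fun s => s.1 == u)).map (fun s => s.2)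

-- in-range assignment is List.set at the slot
lemma pySetD_eq_set (l : List (List Int)) (num u : Int) (v : List Int)
    (h1 : -num ≤ u) (h2 : u < num) (hl : l.length = num.toNat) :
    PySem.List.pySetD l u v = l.set (pvSlot num u) v := by
  unfold PySem.List.pySetD PySem.List.pySet? PySem.List.pyIdx? pvSlot
  by_cases hn : u < 0
  · rw [if_neg (by omega), if_pos (by omega : -(l.length : Int) ≤ u), if_pos hn]
    simp only [Option.map_some, Option.getD_some]
    congr 1
    omega
  · rw [if_pos (by omega), if_pos (by omega : u < (l.length : Int)), if_neg hn]
    rfl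

-- what a fold of slot-writes leaves at index j: the LAST writer of slot j wins
lemma foldl_set_getElem? {α : Type} (pos : α → Nat) (g : α → List Int) :
    ∀ (l : List α) (init : List (List Int)) (j : Nat),
    (∀ u ∈ l, pos u < init.length) →
    (l.foldl (fun acc u => acc.set (pos u) (g u)) init)[j]? =
      (match l.reverse.find? (fun u => pos u == j) with
       | some u => some (g u)
       | none => init[j]?) := by
  intro l
  induction l with
  | nil => intro init j _; simp
  | cons x l ih =>
    intro init j hpos
    have hx : pos x < init.length := hpos x (List.mem_cons_self)
    rw [List.foldl_cons, ih (init.set (pos x) (g x)) j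
        (by intro u hu; rw [List.length_set]; exact hpos u (List.mem_cons_of_mem _ hu))]
    rw [List.reverse_cons, List.find?_append]
    cases hf : l.reverse.find? (fun u => pos u == j) with
    | some u => simp
    | none =>
      simp only [Option.none_or]
      by_cases hxj : pos x = j
      · simp [hxj, hxj ▸ hx]
      · have hb : (pos x == j) = false := by simpa using hxj
        simp only [List.find?_cons, List.find?_nil, List.getElem?_set, hb]
        exact if_neg hxj

-- two lists with the same members and a slot map injective on them agree on find?
lemma find?_slot_congr {α : Type} [DecidableEq α] (pos : α → Nat) (l1 l2 : List α) (j : Nat)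
    (hmem : ∀ u, u ∈ l1 ↔ u ∈ l2)
    (hinj : ∀ a ∈ l1, ∀ b ∈ l1, pos a = pos b → a = b) :
    l1.find? (fun u => pos u == j) = l2.find? (fun u => pos u == j) := by
  cases h1 : l1.find? (fun u => pos u == j) with
  | none =>
    cases h2 : l2.find? (fun u => pos u == j) with
    | none => rfl
    | some b =>
      have hb := List.mem_of_find?_eq_some h2
      exact absurd (List.find?_some h2) ((List.find?_eq_none.mp h1) b ((hmem b).mpr hb))
  | some a =>
    have ha := List.mem_of_find?_eq_some h1
    have hpa : pos a = j := by simpa using List.find?_some h1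
    cases h2 : l2.find? (fun u => pos u == j) with
    | none =>
      exact absurd (by simpa using hpa : (pos a == j) = true)
        ((List.find?_eq_none.mp h2) a ((hmem a).mp ha))
    | some b =>
      have hb := List.mem_of_find?_eq_some h2
      have hpb : pos b = j := by simpa using List.find?_some h2
      have : a = b := hinj a ha b ((hmem b).mpr hb) (by omega)
      rw [this]

-- a fold of in-range pySetD writes is a fold of List.set writes
lemma fold_pySetD_eq_fold_set (num : Int) (g : Int → List Int) :
    ∀ (l : List Int) (init : List (List Int)), init.length = num.toNat →
    (∀ u ∈ l, -num ≤ u ∧ u < num) →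
    l.foldl (fun acc u => PySem.List.pySetD acc u (g u)) init =
      l.foldl (fun acc u => acc.set (pvSlot num u) (g u)) init := by
  intro l
  induction l with
  | nil => intro init _ _; rfl
  | cons x l ih =>
    intro init hlen hr
    have hx := hr x (List.mem_cons_self)
    rw [List.foldl_cons, List.foldl_cons,
        pySetD_eq_set init num x (g x) hx.1 hx.2 hlen,
        ih _ (by rw [List.length_set]; exact hlen)
          (fun u hu => hr u (List.mem_cons_of_mem _ hu))]

lemma slot_fold_eq (num : Int) (g : Int → List Int) (l1 l2 : List Int)
    (init : List (List Int))
    (hmem : ∀ u, u ∈ l1 ↔ u ∈ l2)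
    (hr : ∀ u ∈ l1, -num ≤ u ∧ u < num)
    (hinj : ∀ a ∈ l1, ∀ b ∈ l1, pvSlot num a = pvSlot num b → a = b)
    (hlen : init.length = num.toNat) :
    l1.foldl (fun acc u => acc.set (pvSlot num u) (g u)) init =
      l2.foldl (fun acc u => acc.set (pvSlot num u) (g u)) init := by
  apply List.ext_getElem?
  intro j
  have hb1 : ∀ u ∈ l1, pvSlot num u < init.length := by
    intro u hu; have := hr u hu; unfold pvSlot; rw [hlen]; split <;> omega
  rw [foldl_set_getElem? (pvSlot num) g l1 init j hb1,
      foldl_set_getElem? (pvSlot num) g l2 init j (fun u hu => hb1 u ((hmem u).mpr hu)),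
      find?_slot_congr (pvSlot num) l1.reverse l2.reverse j
        (by intro u; rw [List.mem_reverse, List.mem_reverse]; exact hmem u)
        (by intro a ha b hb; rw [List.mem_reverse] at ha hb; exact hinj a ha b hb)]

-- A's inner filter collapses: the pre-filter by membership is redundant for s.1 == i
lemma inner_filter_collapse (U_I_pairs : List (Int × Int)) (u_b : PySem.Set Int) (i : Int)
    (hi : i ∈ u_b) :
    (U_I_pairs.filter (fun s => PySem.Set.contains u_b s.1)).filter (fun s => s.1 == i) =
      U_I_pairs.filter (fun s => s.1 == i) := by
  rw [List.filter_filter]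
  apply List.filter_congr
  intro s _
  by_cases h : s.1 = i
  · subst h
    simp [hi]
  · simp [h]

-- ===== VERDICT (by name: the statement is the Claim_ definition above) =====
theorem filter_ui_spec : Claim_equal_filter_ui := by
  intro UB UI num _ hpre
  obtain ⟨hrange, hcoll⟩ := hpre
  unfold Spec_filter_ui filter_ui filter_ui_alt
  simp only []
  set firsts := UB.map (fun s => s.1) with hfirsts
  have hmemf : ∀ u, u ∈ PySem.Set.ofList firsts ↔ u ∈ firsts := by
    intro u; exact PySem.Set.mem_ofList firsts u
  have hrange' : ∀ u ∈ firsts, -num ≤ u ∧ u < num := by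
    intro u hu
    obtain ⟨p, hp, rfl⟩ := List.mem_map.mp hu
    exact hrange p hp
  have hinj : ∀ a ∈ firsts, ∀ b ∈ firsts, pvSlot num a = pvSlot num b → a = b := by
    intro a ha b hb hab
    obtain ⟨p, hp, rfl⟩ := List.mem_map.mp ha
    obtain ⟨q, hq, rfl⟩ := List.mem_map.mp hb
    have h1 := hrange p hp
    have h2 := hrange q hq
    unfold pvSlot at hab
    rcases lt_or_ge p.1 0 with hpn | hpn <;> rcases lt_or_ge q.1 0 with hqn | hqn
    · simp only [if_pos hpn, if_pos hqn] at hab; omega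
    · have := hcoll p hp q hq hpn hqn
      simp only [if_pos hpn, if_neg (not_lt.mpr hqn)] at hab; omega
    · have := hcoll q hq p hp hqn hpn
      simp only [if_neg (not_lt.mpr hpn), if_pos hqn] at hab; omega
    · simp only [if_neg (not_lt.mpr hpn), if_neg (not_lt.mpr hqn)] at hab; omega
  -- A side: collapse the inner filter, then turn pySetD into set
  rw [PySem.List.foldl_congr_mem (PySem.Set.ofList firsts)
      _ (fun l i => PySem.List.pySetD l i (pvVals UI i)) _
      (by
        intro acc i hi
        rw [inner_filter_collapse UI (PySem.Set.ofList firsts) i hi]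
        rfl)]
  rw [fold_pySetD_eq_fold_set num (pvVals UI) (PySem.Set.ofList firsts) _
      (by simp) (fun u hu => hrange' u ((hmemf u).mp hu))]
  -- B side: the dict group of u is pvVals UI u, then turn pySetD into set
  rw [show (fun (out : List (List Int)) (p : Int × Int) =>
        PySem.List.pySetD out p.1
          (PySem.Dict.getD (UI.foldl (fun d p => d.modify p.1 [] (fun l => l ++ [p.2]))
            PySem.Dict.empty) p.1 [])) =
      (fun out p => PySem.List.pySetD out p.1 (pvVals UI p.1)) from by
        funext out p
        rw [PySem.Dict.getD_foldl_modify_append UI PySem.Dict.empty p.1,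
            PySem.Dict.getD_empty]
        rfl]
  rw [← List.foldl_map (f := fun p : Int × Int => p.1)
        (g := fun acc u => PySem.List.pySetD acc u (pvVals UI u))]
  rw [fold_pySetD_eq_fold_set num (pvVals UI) firsts _ (by simp) hrange']
  -- both are slot-write folds; the key lists have the same members and injective slots
  exact slot_fold_eq num (pvVals UI) (PySem.Set.ofList firsts) firsts _ hmemf
    (fun u hu => hrange' u ((hmemf u).mp hu))
    (fun a ha b hb => hinj a ((hmemf a).mp ha) b ((hmemf b).mp hb))
    (by simp)
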